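-- pv_equiv track=rewrite | github.com/imaun/ADOC-2024 | 10/day10.py | bfs
-- ===== SOURCE A (Python) =====
-- def get_neighbors(x, y, rows, cols):
--     neighbors = []
--     for dx, dy in [(-1, 0), (1, 0), (0, -1), (0, 1)]:
--         nx, ny = x + dx, y + dy
--         if 0 <= nx < rows and 0 <= ny < cols:
--             neighbors.append((nx, ny))
--     return neighbors
--
-- def bfs(map_data, start_x, start_y):
--     rows, cols = len(map_data), len(map_data[0])
--     queue = [(start_x, start_y)]
--     visited = set(queue)
--     reachable_nines = set()
--
--     while queue:
--         x, y = queue.pop(0)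
--         for nx, ny in get_neighbors(x, y, rows, cols):
--             if (nx, ny) not in visited and map_data[nx][ny] == map_data[x][y] + 1:
--                 visited.add((nx, ny))
--                 queue.append((nx, ny))
--                 if map_data[nx][ny] == 9:
--                     reachable_nines.add((nx, ny))
--
--     return len(reachable_nines)
-- ===== SOURCE B (Python) =====
-- def bfs(map_data, start_x, start_y):
--     rows, cols = len(map_data), len(map_data[0])
--     visited = {(start_x, start_y)}
--     reachable_nines = set()
--
--     def dfs(x, y):
--         for nx, ny in ((x - 1, y), (x + 1, y), (x, y - 1), (x, y + 1)):
--             if 0 <= nx < rows and 0 <= ny < cols and (nx, ny) not in visited \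
--                     and map_data[nx][ny] == map_data[x][y] + 1:
--                 visited.add((nx, ny))
--                 if map_data[nx][ny] == 9:
--                     reachable_nines.add((nx, ny))
--                 dfs(nx, ny)
--
--     dfs(start_x, start_y)
--     return len(reachable_nines)
-- ===== Notes on version B (the rewrite author's own statement) =====
-- stated objective: alternative
-- what changed: Replaces the FIFO-queue breadth-first loop (pop(0), append, shared visited scan per dequeued cell) by a recursive depth-first traversal: a nested dfs(x,y) that marks each admissible neighbour visited (and records it if it is a 9) before immediately recursing into it; no queue exists at all.
-- outside the precondition, e.g. on bfs([[0], [5, 5]], 0, 0): A returns 0, B returns 0; on bfs([[1, 2], [3]], 0, 0): A raises IndexError, B raises IndexError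
import Mathlib
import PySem

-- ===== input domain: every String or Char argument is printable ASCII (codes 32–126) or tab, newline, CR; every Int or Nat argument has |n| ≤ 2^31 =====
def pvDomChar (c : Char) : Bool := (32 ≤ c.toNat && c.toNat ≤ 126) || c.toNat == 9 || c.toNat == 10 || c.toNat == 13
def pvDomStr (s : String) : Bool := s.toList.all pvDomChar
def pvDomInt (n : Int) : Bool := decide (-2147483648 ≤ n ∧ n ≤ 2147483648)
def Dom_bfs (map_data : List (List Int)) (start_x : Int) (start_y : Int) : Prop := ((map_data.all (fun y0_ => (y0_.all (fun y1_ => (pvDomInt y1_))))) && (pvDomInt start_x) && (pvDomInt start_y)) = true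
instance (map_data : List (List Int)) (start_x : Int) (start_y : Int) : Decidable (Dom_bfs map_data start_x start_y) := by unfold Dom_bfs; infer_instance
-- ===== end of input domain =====

-- B replaces A's FIFO-queue breadth-first loop by a recursive depth-first traversal
-- over the same visited/reachable-nines sets (same return value; no speed claim).

-- map_data[x][y] (Python negative-index semantics via pyGet?); the .getD defaults are
-- never reached on inputs admitted by Pre_bfs (all performed reads are in range there).
def pvAt (map_data : List (List Int)) (x y : Int) : Int :=
  (PySem.List.pyGet? ((PySem.List.pyGet? map_data x).getD []) y).getD 0

-- ===== PORT A =====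
def pvGetNeighbors (x y rows cols : Int) : List (Int × Int) :=
  [((-1 : Int), (0 : Int)), (1, 0), (0, -1), (0, 1)].foldl
    (fun acc d =>
      let nx := x + d.1
      let ny := y + d.2
      if 0 ≤ nx ∧ nx < rows ∧ 0 ≤ ny ∧ ny < cols then acc ++ [(nx, ny)] else acc) []

-- the while-queue loop; fuel only makes the recursion structural (never exhausted: each
-- popped element was enqueued once, and at most rows*cols+1 cells are ever enqueued)
def pvLoopA (map_data : List (List Int)) (rows cols : Int) :
    Nat → List (Int × Int) → PySem.Set (Int × Int) → PySem.Set (Int × Int) →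
    PySem.Set (Int × Int)
  | 0, _, _, nines => nines
  | _ + 1, [], _, nines => nines
  | f + 1, c :: rest, visited, nines =>
      let st :=
        (pvGetNeighbors c.1 c.2 rows cols).foldl
          (fun (st : List (Int × Int) × PySem.Set (Int × Int) × PySem.Set (Int × Int)) n =>
            if ¬ (PySem.Set.contains st.2.1 n = true) ∧
                pvAt map_data n.1 n.2 = pvAt map_data c.1 c.2 + 1 then
              (st.1 ++ [n], PySem.Set.add st.2.1 n,
               if pvAt map_data n.1 n.2 = 9 then PySem.Set.add st.2.2 n else st.2.2)
            else st)
          (rest, visited, nines)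
      pvLoopA map_data rows cols f st.1 st.2.1 st.2.2

def bfs (map_data : List (List Int)) (start_x : Int) (start_y : Int) : Int :=
  let rows : Int := map_data.length
  let cols : Int := ((map_data.head?.getD []).length : Int)
  let fuel : Nat := map_data.length * (map_data.head?.getD []).length + 1
  PySem.Set.len
    (pvLoopA map_data rows cols fuel [(start_x, start_y)]
      (PySem.Set.ofList [(start_x, start_y)]) PySem.Set.empty)

-- ===== PORT B =====
-- recursive dfs(x, y): visit each admissible unvisited neighbour, record it if it is a 9,
-- recurse into it immediately; state = (visited, reachable_nines); fuel as for A
def pvDfsB (map_data : List (List Int)) (rows cols : Int) :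
    Nat → Int × Int → PySem.Set (Int × Int) × PySem.Set (Int × Int) →
    PySem.Set (Int × Int) × PySem.Set (Int × Int)
  | 0, _, st => st
  | f + 1, c, st =>
      [(c.1 - 1, c.2), (c.1 + 1, c.2), (c.1, c.2 - 1), (c.1, c.2 + 1)].foldl
        (fun (st : PySem.Set (Int × Int) × PySem.Set (Int × Int)) n =>
          if 0 ≤ n.1 ∧ n.1 < rows ∧ 0 ≤ n.2 ∧ n.2 < cols ∧
              ¬ (PySem.Set.contains st.1 n = true) ∧
              pvAt map_data n.1 n.2 = pvAt map_data c.1 c.2 + 1 then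
            pvDfsB map_data rows cols f n
              (PySem.Set.add st.1 n,
               if pvAt map_data n.1 n.2 = 9 then PySem.Set.add st.2 n else st.2)
          else st)
        st

def bfs_alt (map_data : List (List Int)) (start_x : Int) (start_y : Int) : Int :=
  let rows : Int := map_data.length
  let cols : Int := ((map_data.head?.getD []).length : Int)
  let fuel : Nat := map_data.length * (map_data.head?.getD []).length + 1
  PySem.Set.len
    (pvDfsB map_data rows cols fuel (start_x, start_y)
      (PySem.Set.ofList [(start_x, start_y)], PySem.Set.empty)).2

-- ===== PRECONDITION & SPEC =====
-- Pre_bfs = inputs on which Python A returns normally: a nonempty grid and, whenever the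
-- start has an in-bounds neighbour (only then is any cell ever read), rows all of equal
-- length and a start index valid under Python's negative-index rule.  It excludes ragged
-- grids whose raggedness the search would only meet (or miss) depending on reachability —
-- not expressible as a closed-form condition — on some of which A happens to return.
def Pre_bfs (map_data : List (List Int)) (start_x : Int) (start_y : Int) : Prop :=
  map_data ≠ [] ∧
  ((∃ n ∈ [(start_x - 1, start_y), (start_x + 1, start_y),
           (start_x, start_y - 1), (start_x, start_y + 1)],
      0 ≤ n.1 ∧ n.1 < (map_data.length : Int) ∧ 0 ≤ n.2 ∧
        n.2 < ((map_data.head?.getD []).length : Int)) →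
    ((∀ row ∈ map_data, row.length = (map_data.head?.getD []).length) ∧
     -(map_data.length : Int) ≤ start_x ∧ start_x < (map_data.length : Int) ∧
     -((map_data.head?.getD []).length : Int) ≤ start_y ∧
       start_y < ((map_data.head?.getD []).length : Int)))
instance (map_data : List (List Int)) (start_x : Int) (start_y : Int) :
    Decidable (Pre_bfs map_data start_x start_y) := by unfold Pre_bfs; infer_instance

def pvWitness_bfs : List (List Int) × Int × Int := ([[8, 9], [0, 9]], 0, 0)

def Spec_bfs (map_data : List (List Int)) (start_x : Int) (start_y : Int) (out : Int) : Prop := out = bfs_alt map_data start_x start_y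
instance (map_data : List (List Int)) (start_x : Int) (start_y : Int) (out : Int) : Decidable (Spec_bfs map_data start_x start_y out) := by unfold Spec_bfs; infer_instance

-- ===== CLAIM (what is proved, stated in full; the proofs are below) =====
def Claim_equal_bfs : Prop := ∀ (map_data : List (List Int)) (start_x : Int) (start_y : Int), Dom_bfs map_data start_x start_y → Pre_bfs map_data start_x start_y → Spec_bfs map_data start_x start_y (bfs map_data start_x start_y)

-- ===== LEMMAS AND PROOFS =====

-- the step relation: e is an in-bounds 4-neighbour of c one level higher
def pvAdj (map_data : List (List Int)) (rows cols : Int) (c e : Int × Int) : Prop :=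
  (e = (c.1 - 1, c.2) ∨ e = (c.1 + 1, c.2) ∨ e = (c.1, c.2 - 1) ∨ e = (c.1, c.2 + 1)) ∧
  0 ≤ e.1 ∧ e.1 < rows ∧ 0 ≤ e.2 ∧ e.2 < cols ∧
  pvAt map_data e.1 e.2 = pvAt map_data c.1 c.2 + 1

-- reachability from c by pvAdj steps all of whose targets avoid V (reflexive at c)
inductive pvRA (map_data : List (List Int)) (rows cols : Int) (V : Int × Int → Prop) :
    (Int × Int) → (Int × Int) → Prop
  | refl (c : Int × Int) : pvRA map_data rows cols V c c
  | step {c m e : Int × Int} : pvRA map_data rows cols V c m →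
      pvAdj map_data rows cols m e → ¬ V e → pvRA map_data rows cols V c e

theorem pvRA_mono {map_data : List (List Int)} {rows cols : Int}
    {V W : Int × Int → Prop} (h : ∀ x, V x → W x) {c e : Int × Int}
    (hr : pvRA map_data rows cols W c e) : pvRA map_data rows cols V c e := by
  induction hr with
  | refl => exact pvRA.refl _
  | step h1 h2 h3 ih => exact pvRA.step ih h2 (fun hv => h3 (h _ hv))

theorem pvRA_congr {map_data : List (List Int)} {rows cols : Int}
    {V W : Int × Int → Prop} (h : ∀ x, V x ↔ W x) {c e : Int × Int} :
    pvRA map_data rows cols V c e ↔ pvRA map_data rows cols W c e :=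
  ⟨pvRA_mono (fun x hx => (h x).mpr hx), pvRA_mono (fun x hx => (h x).mp hx)⟩

theorem pvRA_trans {map_data : List (List Int)} {rows cols : Int}
    {V : Int × Int → Prop} {c m e : Int × Int}
    (h1 : pvRA map_data rows cols V c m) (h2 : pvRA map_data rows cols V m e) :
    pvRA map_data rows cols V c e := by
  induction h2 with
  | refl => exact h1
  | step ha hb hc ih => exact pvRA.step ih hb hc

theorem pvRA_split {map_data : List (List Int)} {rows cols : Int}
    {V S : Int × Int → Prop} {c e : Int × Int}
    (hr : pvRA map_data rows cols V c e) :
    pvRA map_data rows cols (fun x => V x ∨ S x) c e ∨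
      (∃ n, S n ∧ pvRA map_data rows cols (fun x => V x ∨ S x) n e) ∨ S e := by
  induction hr with
  | refl => exact Or.inl (pvRA.refl _)
  | @step m' e' h1 h2 h3 ih =>
    by_cases hs : S e'
    · exact Or.inr (Or.inr hs)
    · have hne : ¬ (V e' ∨ S e') := fun hv => hv.elim h3 hs
      rcases ih with h | ⟨n, hn, h⟩ | h
      · exact Or.inl (pvRA.step h h2 hne)
      · exact Or.inr (Or.inl ⟨n, hn, pvRA.step h h2 hne⟩)
      · exact Or.inr (Or.inl ⟨m', h, pvRA.step (pvRA.refl m') h2 hne⟩)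

theorem pvRA_first {map_data : List (List Int)} {rows cols : Int}
    {V : Int × Int → Prop} {c e : Int × Int}
    (hr : pvRA map_data rows cols V c e) :
    e = c ∨ ∃ m, pvAdj map_data rows cols c m ∧ ¬ V m ∧ pvRA map_data rows cols V m e := by
  induction hr with
  | refl => exact Or.inl rfl
  | @step m' e' h1 h2 h3 ih =>
    rcases ih with rfl | ⟨m, ha, hb, hc⟩
    · exact Or.inr ⟨e', h2, h3, pvRA.refl e'⟩
    · exact Or.inr ⟨m, ha, hb, pvRA.step hc h2 h3⟩

-- a single starting point can be absorbed into the avoided set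
theorem pvRA_absorb_start {map_data : List (List Int)} {rows cols : Int}
    {V : Int × Int → Prop} {n e : Int × Int} :
    pvRA map_data rows cols V n e ↔
      e = n ∨ pvRA map_data rows cols (fun x => V x ∨ x = n) n e := by
  constructor
  · intro hr
    rcases pvRA_split (S := fun x => x = n) hr with h | ⟨m, hm, h⟩ | h
    · exact Or.inr h
    · subst hm; exact Or.inr h
    · exact Or.inl h
  · rintro (rfl | h)
    · exact pvRA.refl e
    · exact pvRA_mono (fun x hx => Or.inl hx) h

-- the four candidate neighbour cells, in program order
def pvNbrs (c : Int × Int) : List (Int × Int) :=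
  [(c.1 - 1, c.2), (c.1 + 1, c.2), (c.1, c.2 - 1), (c.1, c.2 + 1)]

theorem pvNbrs_nodup (c : Int × Int) : (pvNbrs c).Nodup := by
  simp [pvNbrs, Prod.ext_iff]
  omega

theorem pvGetNeighbors_eq (x y rows cols : Int) :
    pvGetNeighbors x y rows cols =
      (pvNbrs (x, y)).filter
        (fun n => decide (0 ≤ n.1 ∧ n.1 < rows ∧ 0 ≤ n.2 ∧ n.2 < cols)) := by
  simp only [pvGetNeighbors, pvNbrs, List.foldl_cons, List.foldl_nil,
    List.filter_cons, List.filter_nil, decide_eq_true_eq]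
  norm_num
  split_ifs <;> simp_all <;> omega

-- newly discovered neighbours of c given the current visited list
def pvNews (map_data : List (List Int)) (rows cols : Int)
    (vis : List (Int × Int)) (c : Int × Int) : List (Int × Int) :=
  (pvGetNeighbors c.1 c.2 rows cols).filter
    (fun n => decide (¬ n ∈ vis ∧ pvAt map_data n.1 n.2 = pvAt map_data c.1 c.2 + 1))

theorem mem_pvNews {map_data : List (List Int)} {rows cols : Int}
    {vis : List (Int × Int)} {c n : Int × Int} :
    n ∈ pvNews map_data rows cols vis c ↔
      pvAdj map_data rows cols c n ∧ ¬ n ∈ vis := by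
  simp [pvNews, pvGetNeighbors_eq, pvAdj, pvNbrs, List.mem_filter]
  tauto

theorem pvNews_nodup (map_data : List (List Int)) (rows cols : Int)
    (vis : List (Int × Int)) (c : Int × Int) :
    (pvNews map_data rows cols vis c).Nodup := by
  unfold pvNews
  rw [pvGetNeighbors_eq]
  exact ((pvNbrs_nodup (c.1, c.2)).filter _).filter _

-- the finite set of in-bounds cells, and the termination measure: unvisited in-bounds cells
def pvGrid (rows cols : Int) : Finset (Int × Int) :=
  ((Finset.range rows.toNat).image (fun i : Nat => (i : Int))) ×ˢ
    ((Finset.range cols.toNat).image (fun j : Nat => (j : Int)))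

theorem mem_pvGrid {rows cols : Int} {x : Int × Int} :
    x ∈ pvGrid rows cols ↔ 0 ≤ x.1 ∧ x.1 < rows ∧ 0 ≤ x.2 ∧ x.2 < cols := by
  simp only [pvGrid, Finset.mem_product, Finset.mem_image, Finset.mem_range]
  constructor
  · rintro ⟨⟨i, hi, hieq⟩, ⟨j, hj, hjeq⟩⟩
    omega
  · rintro ⟨h1, h2, h3, h4⟩
    exact ⟨⟨x.1.toNat, by omega, by omega⟩, ⟨x.2.toNat, by omega, by omega⟩⟩

theorem card_pvGrid (rows cols : Int) :
    (pvGrid rows cols).card = rows.toNat * cols.toNat := by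
  rw [pvGrid, Finset.card_product,
    Finset.card_image_of_injective _ (fun a b h => by omega),
    Finset.card_image_of_injective _ (fun a b h => by omega),
    Finset.card_range, Finset.card_range]

def pvUnv (rows cols : Int) (vis : List (Int × Int)) : Nat :=
  ((pvGrid rows cols).filter (fun c => c ∉ vis)).card

theorem pvUnv_le_of_subset {rows cols : Int} {vis vis' : List (Int × Int)}
    (h : ∀ x ∈ vis, x ∈ vis') : pvUnv rows cols vis' ≤ pvUnv rows cols vis := by
  apply Finset.card_le_card
  intro x hx
  simp only [Finset.mem_filter] at *
  exact ⟨hx.1, fun hm => hx.2 (h x hm)⟩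

theorem pvUnv_append_single {rows cols : Int} {vis : List (Int × Int)} {n : Int × Int}
    (hnv : n ∉ vis) (hb : 0 ≤ n.1 ∧ n.1 < rows ∧ 0 ≤ n.2 ∧ n.2 < cols) :
    pvUnv rows cols (vis ++ [n]) + 1 = pvUnv rows cols vis := by
  unfold pvUnv
  have hmem : n ∈ (pvGrid rows cols).filter (fun c => c ∉ vis) := by
    simp [Finset.mem_filter, mem_pvGrid, hnv, hb]
  have : (pvGrid rows cols).filter (fun c => c ∉ vis ++ [n]) =
      ((pvGrid rows cols).filter (fun c => c ∉ vis)).erase n := by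
    ext x
    simp [Finset.mem_filter, Finset.mem_erase, List.mem_append]
    tauto
  rw [this, Finset.card_erase_of_mem hmem]
  have := Finset.card_pos.mpr ⟨n, hmem⟩
  omega

theorem pvUnv_append {rows cols : Int} {vis news : List (Int × Int)}
    (hnd : news.Nodup)
    (h : ∀ n ∈ news, n ∉ vis ∧ 0 ≤ n.1 ∧ n.1 < rows ∧ 0 ≤ n.2 ∧ n.2 < cols) :
    pvUnv rows cols (vis ++ news) + news.length = pvUnv rows cols vis := by
  induction news generalizing vis with
  | nil => simp
  | cons n rest ih =>
    have h1 := h n (by simp)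
    have step := pvUnv_append_single (vis := vis) h1.1 h1.2
    have hrec := ih (hnd.of_cons)
      (fun m hm => by
        have := h m (by simp [hm])
        refine ⟨?_, this.2⟩
        simp only [List.mem_append, List.mem_singleton]
        rintro (hv | rfl)
        · exact this.1 hv
        · exact (List.nodup_cons.mp hnd).1 hm)
      (vis := vis ++ [n])
    have hassoc : vis ++ n :: rest = (vis ++ [n]) ++ rest := by simp
    have hlen : (n :: rest).length = rest.length + 1 := rfl
    rw [hassoc, hlen]
    omega

theorem pvUnv_top (rows cols : Int) (vis : List (Int × Int)) :
    pvUnv rows cols vis ≤ rows.toNat * cols.toNat := by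
  calc pvUnv rows cols vis ≤ (pvGrid rows cols).card := Finset.card_filter_le _ _
    _ = rows.toNat * cols.toNat := card_pvGrid rows cols

-- A's inner for-loop over the neighbour list, computed in closed form
theorem foldA_gen (map_data : List (List Int)) (c : Int × Int) :
    ∀ (ns : List (Int × Int)) (q vis nines : List (Int × Int)), ns.Nodup →
    (∀ x ∈ nines, x ∈ vis) →
    ns.foldl
      (fun (st : List (Int × Int) × PySem.Set (Int × Int) × PySem.Set (Int × Int)) n =>
        if ¬ (PySem.Set.contains st.2.1 n = true) ∧
            pvAt map_data n.1 n.2 = pvAt map_data c.1 c.2 + 1 then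
          (st.1 ++ [n], PySem.Set.add st.2.1 n,
           if pvAt map_data n.1 n.2 = 9 then PySem.Set.add st.2.2 n else st.2.2)
        else st)
      (q, vis, nines) =
    (q ++ ns.filter (fun n => decide (¬ n ∈ vis ∧ pvAt map_data n.1 n.2 = pvAt map_data c.1 c.2 + 1)),
     vis ++ ns.filter (fun n => decide (¬ n ∈ vis ∧ pvAt map_data n.1 n.2 = pvAt map_data c.1 c.2 + 1)),
     nines ++ (ns.filter (fun n => decide (¬ n ∈ vis ∧ pvAt map_data n.1 n.2 = pvAt map_data c.1 c.2 + 1))).filter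
       (fun n => decide (pvAt map_data n.1 n.2 = 9))) := by
  intro ns
  induction ns with
  | nil => intro q vis nines _ _; simp
  | cons n rest ih =>
    intro q vis nines hnd hnine
    by_cases hcond : ¬ n ∈ vis ∧ pvAt map_data n.1 n.2 = pvAt map_data c.1 c.2 + 1
    · have hcont : ¬ (PySem.Set.contains vis n = true) := by
        simpa [PySem.Set.contains_iff] using hcond.1
      have hfc : (n :: rest).filter
          (fun m => decide (¬ m ∈ vis ∧ pvAt map_data m.1 m.2 = pvAt map_data c.1 c.2 + 1)) =
          n :: rest.filter
          (fun m => decide (¬ m ∈ vis ∧ pvAt map_data m.1 m.2 = pvAt map_data c.1 c.2 + 1)) :=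
        List.filter_cons_of_pos (by simpa using hcond)
      rw [List.foldl_cons, if_pos ⟨hcont, hcond.2⟩, hfc]
      have hadd : PySem.Set.add vis n = vis ++ [n] := PySem.Set.add_of_not_mem hcond.1
      have hnn : n ∉ nines := fun hx => hcond.1 (hnine n hx)
      have hfilt : rest.filter (fun m => decide (¬ m ∈ vis ++ [n] ∧
          pvAt map_data m.1 m.2 = pvAt map_data c.1 c.2 + 1)) =
          rest.filter (fun m => decide (¬ m ∈ vis ∧
          pvAt map_data m.1 m.2 = pvAt map_data c.1 c.2 + 1)) := by
        apply List.filter_congr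
        intro m hm
        have : m ≠ n := fun h => (List.nodup_cons.mp hnd).1 (h ▸ hm)
        simp [List.mem_append, this]
      by_cases h9 : pvAt map_data n.1 n.2 = 9
      · rw [List.filter_cons_of_pos (by simpa using h9), if_pos h9]
        have hadd9 : PySem.Set.add nines n = nines ++ [n] := PySem.Set.add_of_not_mem hnn
        rw [hadd, hadd9, ih (q ++ [n]) (vis ++ [n]) (nines ++ [n]) hnd.of_cons
          (by intro x hx; rcases List.mem_append.mp hx with h | h
              · exact List.mem_append.mpr (Or.inl (hnine x h))
              · exact List.mem_append.mpr (Or.inr h)), hfilt]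
        simp
      · rw [List.filter_cons_of_neg (by simpa using h9), if_neg h9]
        rw [hadd, ih (q ++ [n]) (vis ++ [n]) nines hnd.of_cons
          (fun x hx => List.mem_append.mpr (Or.inl (hnine x hx))), hfilt]
        simp
    · have hng : ¬ (¬ (PySem.Set.contains vis n = true) ∧
          pvAt map_data n.1 n.2 = pvAt map_data c.1 c.2 + 1) := by
        simp only [PySem.Set.contains_iff]
        tauto
      rw [List.foldl_cons, if_neg hng, List.filter_cons_of_neg (by simpa using hcond)]
      exact ih q vis nines hnd.of_cons hnine

-- the pop step, as an identity of reachable sets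
theorem pop_rhs {map_data : List (List Int)} {rows cols : Int}
    {c : Int × Int} {rest F vis : List (Int × Int)}
    (hc : c ∈ vis) (hF : ∀ n, n ∈ F ↔ pvAdj map_data rows cols c n ∧ n ∉ vis)
    (e : Int × Int) :
    ((∃ s ∈ c :: rest, pvRA map_data rows cols (fun x => x ∈ vis) s e) ∧ e ∉ vis) ↔
      (e ∈ F ∨ ((∃ s ∈ rest ++ F, pvRA map_data rows cols (fun x => x ∈ vis ++ F) s e) ∧
        e ∉ vis ++ F)) := by
  have hcongr : ∀ a b : Int × Int,
      pvRA map_data rows cols (fun x => x ∈ vis ∨ x ∈ F) a b ↔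
      pvRA map_data rows cols (fun x => x ∈ vis ++ F) a b :=
    fun a b => pvRA_congr (fun x => (List.mem_append).symm)
  constructor
  · rintro ⟨⟨s, hs, hr⟩, he⟩
    rcases pvRA_split (S := fun x => x ∈ F) hr with h | ⟨n, hn, h⟩ | h
    · rcases List.mem_cons.mp hs with rfl | hsr
      · rcases pvRA_first h with rfl | ⟨m, hm1, hm2, _⟩
        · exact absurd hc he
        · exact absurd ((hF m).mpr ⟨hm1, fun hv => hm2 (Or.inl hv)⟩)
            (fun hmF => hm2 (Or.inr hmF))
      · by_cases heF : e ∈ F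
        · exact Or.inl heF
        · exact Or.inr ⟨⟨s, List.mem_append.mpr (Or.inl hsr), (hcongr s e).mp h⟩,
            by simp [List.mem_append]; tauto⟩
    · by_cases heF : e ∈ F
      · exact Or.inl heF
      · exact Or.inr ⟨⟨n, List.mem_append.mpr (Or.inr hn), (hcongr n e).mp h⟩,
          by simp [List.mem_append]; tauto⟩
    · exact Or.inl h
  · rintro (heF | ⟨⟨s, hs, hr⟩, he⟩)
    · have := (hF e).mp heF
      exact ⟨⟨c, List.mem_cons_self .., pvRA.step (pvRA.refl c) this.1 this.2⟩, this.2⟩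
    · have he' : e ∉ vis := fun hv => he (List.mem_append.mpr (Or.inl hv))
      have hr' : pvRA map_data rows cols (fun x => x ∈ vis) s e :=
        pvRA_mono (V := fun x => x ∈ vis) (W := fun x => x ∈ vis ∨ x ∈ F)
          (fun x hx => Or.inl hx) ((hcongr s e).mpr hr)
      rcases List.mem_append.mp hs with hsr | hsF
      · exact ⟨⟨s, List.mem_cons_of_mem _ hsr, hr'⟩, he'⟩
      · have := (hF s).mp hsF
        exact ⟨⟨c, List.mem_cons_self ..,
          pvRA_trans (pvRA.step (pvRA.refl c) this.1 this.2) hr'⟩, he'⟩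

theorem pvGetNeighbors_nodup (x y rows cols : Int) :
    (pvGetNeighbors x y rows cols).Nodup := by
  rw [pvGetNeighbors_eq]
  exact (pvNbrs_nodup (x, y)).filter _

-- A's queue loop computes: the old nines plus every newly reachable 9-cell
set_option maxHeartbeats 1000000 in
theorem loopA_char (map_data : List (List Int)) (rows cols : Int) :
    ∀ (fuel : Nat) (queue vis nines : List (Int × Int)),
    vis.Nodup → nines.Nodup → (∀ x ∈ nines, x ∈ vis) → (∀ q ∈ queue, q ∈ vis) →
    queue.length + pvUnv rows cols vis ≤ fuel →
    (pvLoopA map_data rows cols fuel queue vis nines).Nodup ∧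
    ∀ e, e ∈ pvLoopA map_data rows cols fuel queue vis nines ↔
      e ∈ nines ∨ ((∃ s ∈ queue, pvRA map_data rows cols (fun x => x ∈ vis) s e) ∧
        e ∉ vis ∧ pvAt map_data e.1 e.2 = 9) := by
  intro fuel
  induction fuel with
  | zero =>
    intro queue vis nines h1 h2 _ _ hf
    have : queue = [] := List.eq_nil_of_length_eq_zero (by omega)
    subst this
    refine ⟨h2, fun e => ?_⟩
    simp [pvLoopA]
  | succ f ih =>
    intro queue vis nines hvnd hnnd hnv hqv hf
    match queue with
    | [] =>
      refine ⟨hnnd, fun e => ?_⟩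
      simp [pvLoopA]
    | c :: rest =>
      have hns := pvGetNeighbors_nodup c.1 c.2 rows cols
      have hstep : pvLoopA map_data rows cols (f + 1) (c :: rest) vis nines =
          pvLoopA map_data rows cols f
            (rest ++ pvNews map_data rows cols vis c)
            (vis ++ pvNews map_data rows cols vis c)
            (nines ++ (pvNews map_data rows cols vis c).filter
              (fun n => decide (pvAt map_data n.1 n.2 = 9))) := by
        simp only [pvLoopA]
        rw [foldA_gen map_data c _ rest vis nines hns hnv]
        rfl
      set F := pvNews map_data rows cols vis c with hFdef
      have hFmem : ∀ n, n ∈ F ↔ pvAdj map_data rows cols c n ∧ n ∉ vis :=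
        fun n => mem_pvNews
      have hFnd : F.Nodup := pvNews_nodup map_data rows cols vis c
      have hFb : ∀ n ∈ F, n ∉ vis ∧ 0 ≤ n.1 ∧ n.1 < rows ∧ 0 ≤ n.2 ∧ n.2 < cols := by
        intro n hn
        have := (hFmem n).mp hn
        exact ⟨this.2, this.1.2.1, this.1.2.2.1, this.1.2.2.2.1, this.1.2.2.2.2.1⟩
      have hunv := pvUnv_append (rows := rows) (cols := cols) (vis := vis) hFnd hFb
      have hvnd' : (vis ++ F).Nodup := by
        rw [List.nodup_append]
        refine ⟨hvnd, hFnd, ?_⟩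
        intro a ha b hb heq
        exact (hFb b hb).1 (heq ▸ ha)
      have hF9sub : ∀ x ∈ F.filter (fun n => decide (pvAt map_data n.1 n.2 = 9)), x ∈ F :=
        fun x hx => List.mem_of_mem_filter hx
      have hnnd' : (nines ++ F.filter (fun n => decide (pvAt map_data n.1 n.2 = 9))).Nodup := by
        rw [List.nodup_append]
        refine ⟨hnnd, hFnd.filter _, ?_⟩
        intro a ha b hb heq
        exact (hFb b (hF9sub b hb)).1 (heq ▸ hnv a ha)
      have hnv' : ∀ x ∈ nines ++ F.filter (fun n => decide (pvAt map_data n.1 n.2 = 9)),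
          x ∈ vis ++ F := by
        intro x hx
        rcases List.mem_append.mp hx with h | h
        · exact List.mem_append.mpr (Or.inl (hnv x h))
        · exact List.mem_append.mpr (Or.inr (hF9sub x h))
      have hqv' : ∀ q ∈ rest ++ F, q ∈ vis ++ F := by
        intro q hq
        rcases List.mem_append.mp hq with h | h
        · exact List.mem_append.mpr (Or.inl (hqv q (List.mem_cons_of_mem _ h)))
        · exact List.mem_append.mpr (Or.inr h)
      have hf' : (rest ++ F).length + pvUnv rows cols (vis ++ F) ≤ f := by
        have h1 : (c :: rest).length = rest.length + 1 := rfl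
        rw [List.length_append]
        omega
      obtain ⟨hnd2, hiff⟩ := ih (rest ++ F) (vis ++ F) _ hvnd' hnnd' hnv' hqv' hf'
      rw [hstep]
      refine ⟨hnd2, fun e => ?_⟩
      have hpop := pop_rhs (map_data := map_data) (rows := rows) (cols := cols)
        (c := c) (rest := rest) (F := F) (vis := vis)
        (hqv c List.mem_cons_self) hFmem e
      have h9F : e ∈ F.filter (fun n => decide (pvAt map_data n.1 n.2 = 9)) ↔
          e ∈ F ∧ pvAt map_data e.1 e.2 = 9 := by
        simp [List.mem_filter]
      rw [hiff e]
      simp only [List.mem_append, h9F] at hpop ⊢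
      constructor
      · rintro ((hA | ⟨hB, hN⟩) | ⟨hX, hnVB, hN⟩)
        · exact Or.inl hA
        · obtain ⟨hOld, hVv⟩ := hpop.mpr (Or.inl hB)
          exact Or.inr ⟨hOld, hVv, hN⟩
        · obtain ⟨hOld, hVv⟩ := hpop.mpr (Or.inr ⟨hX, hnVB⟩)
          exact Or.inr ⟨hOld, hVv, hN⟩
      · rintro (hA | ⟨hOld, hVv, hN⟩)
        · exact Or.inl (Or.inl hA)
        · rcases hpop.mp ⟨hOld, hVv⟩ with hB | ⟨hX, hnVB⟩
          · exact Or.inl (Or.inr ⟨hB, hN⟩)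
          · exact Or.inr ⟨hX, hnVB, hN⟩

-- B's per-neighbour step (definitionally the lambda inside pvDfsB)
def pvStepB (map_data : List (List Int)) (rows cols : Int) (f : Nat) (c : Int × Int)
    (st : PySem.Set (Int × Int) × PySem.Set (Int × Int)) (n : Int × Int) :
    PySem.Set (Int × Int) × PySem.Set (Int × Int) :=
  if 0 ≤ n.1 ∧ n.1 < rows ∧ 0 ≤ n.2 ∧ n.2 < cols ∧
      ¬ (PySem.Set.contains st.1 n = true) ∧
      pvAt map_data n.1 n.2 = pvAt map_data c.1 c.2 + 1 then
    pvDfsB map_data rows cols f n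
      (PySem.Set.add st.1 n,
       if pvAt map_data n.1 n.2 = 9 then PySem.Set.add st.2 n else st.2)
  else st

theorem pvDfsB_succ (map_data : List (List Int)) (rows cols : Int) (f : Nat)
    (c : Int × Int) (st : PySem.Set (Int × Int) × PySem.Set (Int × Int)) :
    pvDfsB map_data rows cols (f + 1) c st =
      List.foldl (pvStepB map_data rows cols f c) st
        [(c.1 - 1, c.2), (c.1 + 1, c.2), (c.1, c.2 - 1), (c.1, c.2 + 1)] := rfl

-- moving one candidate's discovered region into the avoided set keeps "first-step" reachability
theorem first_shift {map_data : List (List Int)} {rows cols : Int}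
    {c n : Int × Int} {vis : List (Int × Int)} {B : Int × Int → Prop}
    (hB : ∀ x, B x ↔ pvAdj map_data rows cols c n ∧ n ∉ vis ∧
      pvRA map_data rows cols (fun y => y ∈ vis) n x)
    {ns : List (Int × Int)} (e : Int × Int) :
    (∃ m ∈ ns, pvAdj map_data rows cols c m ∧ ¬ (m ∈ vis ∨ B m) ∧
        pvRA map_data rows cols (fun x => x ∈ vis ∨ B x) m e) ∨ B e ∨ e ∈ vis ↔
    (∃ m ∈ ns, pvAdj map_data rows cols c m ∧ m ∉ vis ∧
        pvRA map_data rows cols (fun x => x ∈ vis) m e) ∨ B e ∨ e ∈ vis := by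
  constructor
  · rintro (⟨m, hm, hadj, hnm, hra⟩ | h | h)
    · refine Or.inl ⟨m, hm, hadj, fun hv => hnm (Or.inl hv), ?_⟩
      exact pvRA_mono (fun x hx => Or.inl hx) hra
    · exact Or.inr (Or.inl h)
    · exact Or.inr (Or.inr h)
  · rintro (⟨m, hm, hadj, hnm, hra⟩ | h | h)
    · rcases pvRA_split (S := B) hra with hi | ⟨p, hp, hi⟩ | hi
      · by_cases hBm : B m
        · obtain ⟨hadj', hn', hram⟩ := (hB m).mp hBm
          have : pvRA map_data rows cols (fun x => x ∈ vis) n e :=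
            pvRA_trans hram (pvRA_mono (V := fun x => x ∈ vis)
              (W := fun x => x ∈ vis ∨ B x) (fun x hx => Or.inl hx) hi)
          exact Or.inr (Or.inl ((hB e).mpr ⟨hadj', hn', this⟩))
        · exact Or.inl ⟨m, hm, hadj, fun hv => hv.elim hnm hBm, hi⟩
      · obtain ⟨hadj', hn', hrap⟩ := (hB p).mp hp
        have : pvRA map_data rows cols (fun x => x ∈ vis) n e :=
          pvRA_trans hrap (pvRA_mono (V := fun x => x ∈ vis)
            (W := fun x => x ∈ vis ∨ B x) (fun x hx => Or.inl hx) hi)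
        exact Or.inr (Or.inl ((hB e).mpr ⟨hadj', hn', this⟩))
      · exact Or.inr (Or.inl hi)
    · exact Or.inr (Or.inl h)
    · exact Or.inr (Or.inr h)

-- one candidate n processed from state (vis, nines)
theorem stepB_char (map_data : List (List Int)) (rows cols : Int) (f : Nat)
    (IH : ∀ (c : Int × Int) (vis nines : List (Int × Int)),
      vis.Nodup → nines.Nodup → (∀ x ∈ nines, x ∈ vis) → c ∈ vis →
      pvUnv rows cols vis + 1 ≤ f →
      (pvDfsB map_data rows cols f c (vis, nines)).1.Nodup ∧
      (pvDfsB map_data rows cols f c (vis, nines)).2.Nodup ∧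
      (∀ e, e ∈ (pvDfsB map_data rows cols f c (vis, nines)).1 ↔
        e ∈ vis ∨ pvRA map_data rows cols (fun x => x ∈ vis) c e) ∧
      (∀ e, e ∈ (pvDfsB map_data rows cols f c (vis, nines)).2 ↔
        e ∈ nines ∨ (pvRA map_data rows cols (fun x => x ∈ vis) c e ∧ e ∉ vis ∧
          pvAt map_data e.1 e.2 = 9)))
    (c n : Int × Int)
    (hoff : n = (c.1 - 1, c.2) ∨ n = (c.1 + 1, c.2) ∨ n = (c.1, c.2 - 1) ∨ n = (c.1, c.2 + 1))
    (vis nines : List (Int × Int)) (hvnd : vis.Nodup) (hnnd : nines.Nodup)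
    (hnv : ∀ x ∈ nines, x ∈ vis) (hfu : pvUnv rows cols vis ≤ f) :
    (pvStepB map_data rows cols f c (vis, nines) n).1.Nodup ∧
    (pvStepB map_data rows cols f c (vis, nines) n).2.Nodup ∧
    (∀ e, e ∈ (pvStepB map_data rows cols f c (vis, nines) n).1 ↔
      e ∈ vis ∨ (pvAdj map_data rows cols c n ∧ n ∉ vis ∧
        pvRA map_data rows cols (fun x => x ∈ vis) n e)) ∧
    (∀ e, e ∈ (pvStepB map_data rows cols f c (vis, nines) n).2 ↔
      e ∈ nines ∨ (pvAdj map_data rows cols c n ∧ n ∉ vis ∧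
        pvRA map_data rows cols (fun x => x ∈ vis) n e ∧ e ∉ vis ∧
        pvAt map_data e.1 e.2 = 9)) := by
  by_cases hg : 0 ≤ n.1 ∧ n.1 < rows ∧ 0 ≤ n.2 ∧ n.2 < cols ∧
      ¬ (PySem.Set.contains vis n = true) ∧
      pvAt map_data n.1 n.2 = pvAt map_data c.1 c.2 + 1
  · obtain ⟨h1, h2, h3, h4, h5, h6⟩ := hg
    have hnvis : n ∉ vis := by simpa [PySem.Set.contains_iff] using h5
    have hadj : pvAdj map_data rows cols c n := ⟨hoff, h1, h2, h3, h4, h6⟩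
    have hstep : pvStepB map_data rows cols f c (vis, nines) n =
        pvDfsB map_data rows cols f n
          (vis ++ [n], if pvAt map_data n.1 n.2 = 9 then PySem.Set.add nines n else nines) := by
      rw [pvStepB, if_pos ⟨h1, h2, h3, h4, h5, h6⟩, PySem.Set.add_of_not_mem hnvis]
    have hnn : n ∉ nines := fun hx => hnvis (hnv n hx)
    have hvnd' : (vis ++ [n]).Nodup := by
      rw [List.nodup_append]
      refine ⟨hvnd, List.nodup_singleton n, ?_⟩
      intro a ha b hb heq
      rw [List.mem_singleton] at hb
      exact hnvis (hb ▸ heq ▸ ha)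
    have hfu' : pvUnv rows cols (vis ++ [n]) + 1 ≤ f := by
      have := pvUnv_append_single (vis := vis) hnvis ⟨h1, h2, h3, h4⟩
      omega
    have hmemn : ∀ x : Int × Int, x ∈ vis ++ [n] ↔ x ∈ vis ∨ x = n := by
      intro x; simp [List.mem_append]
    have hracongr : ∀ s e : Int × Int,
        pvRA map_data rows cols (fun x => x ∈ vis ++ [n]) s e ↔
        pvRA map_data rows cols (fun x => x ∈ vis ∨ x = n) s e :=
      fun s e => pvRA_congr hmemn
    by_cases h9 : pvAt map_data n.1 n.2 = 9
    · rw [if_pos h9] at hstep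
      rw [PySem.Set.add_of_not_mem hnn] at hstep
      have hnnd' : (nines ++ [n]).Nodup := by
        rw [List.nodup_append]
        refine ⟨hnnd, List.nodup_singleton n, ?_⟩
        intro a ha b hb heq
        rw [List.mem_singleton] at hb
        exact hnn (hb ▸ heq ▸ ha)
      have hnv' : ∀ x ∈ nines ++ [n], x ∈ vis ++ [n] := by
        intro x hx
        rcases List.mem_append.mp hx with h | h
        · exact List.mem_append.mpr (Or.inl (hnv x h))
        · exact List.mem_append.mpr (Or.inr h)
      obtain ⟨h2nd1, h2nd2, hiff1, hiff2⟩ := IH n (vis ++ [n]) (nines ++ [n]) hvnd' hnnd'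
        hnv' (List.mem_append.mpr (Or.inr (List.mem_singleton.mpr rfl))) hfu'
      rw [hstep]
      refine ⟨h2nd1, h2nd2, fun e => ?_, fun e => ?_⟩
      · rw [hiff1 e, hmemn e, (hracongr n e)]
        rw [pvRA_absorb_start (map_data := map_data) (rows := rows) (cols := cols)
          (V := fun x => x ∈ vis) (n := n) (e := e)]
        constructor
        · rintro ((hv | heq) | hra)
          · exact Or.inl hv
          · exact Or.inr ⟨hadj, hnvis, Or.inl heq⟩
          · exact Or.inr ⟨hadj, hnvis, Or.inr hra⟩
        · rintro (hv | ⟨_, _, (heq | hra)⟩)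
          · exact Or.inl (Or.inl hv)
          · exact Or.inl (Or.inr heq)
          · exact Or.inr hra
      · rw [hiff2 e, List.mem_append, List.mem_singleton, hmemn e, (hracongr n e)]
        rw [pvRA_absorb_start (map_data := map_data) (rows := rows) (cols := cols)
          (V := fun x => x ∈ vis) (n := n) (e := e)]
        constructor
        · rintro ((hn | heq) | ⟨hra, hne, h9e⟩)
          · exact Or.inl hn
          · exact Or.inr ⟨hadj, hnvis, Or.inl heq, by rw [heq]; exact hnvis,
              by rw [heq]; exact h9⟩
          · exact Or.inr ⟨hadj, hnvis, Or.inr hra, fun hv => hne (Or.inl hv), h9e⟩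
        · rintro (hn | ⟨_, _, (heq | hra), hne, h9e⟩)
          · exact Or.inl (Or.inl hn)
          · exact Or.inl (Or.inr heq)
          · by_cases heq2 : e = n
            · exact Or.inl (Or.inr heq2)
            · refine Or.inr ⟨hra, ?_, h9e⟩
              rintro (hv | h)
              · exact hne hv
              · exact heq2 h
    · rw [if_neg h9] at hstep
      obtain ⟨h2nd1, h2nd2, hiff1, hiff2⟩ := IH n (vis ++ [n]) nines hvnd' hnnd
        (fun x hx => List.mem_append.mpr (Or.inl (hnv x hx)))
        (List.mem_append.mpr (Or.inr (List.mem_singleton.mpr rfl))) hfu'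
      rw [hstep]
      refine ⟨h2nd1, h2nd2, fun e => ?_, fun e => ?_⟩
      · rw [hiff1 e, hmemn e, (hracongr n e)]
        rw [pvRA_absorb_start (map_data := map_data) (rows := rows) (cols := cols)
          (V := fun x => x ∈ vis) (n := n) (e := e)]
        constructor
        · rintro ((hv | heq) | hra)
          · exact Or.inl hv
          · exact Or.inr ⟨hadj, hnvis, Or.inl heq⟩
          · exact Or.inr ⟨hadj, hnvis, Or.inr hra⟩
        · rintro (hv | ⟨_, _, (heq | hra)⟩)
          · exact Or.inl (Or.inl hv)
          · exact Or.inl (Or.inr heq)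
          · exact Or.inr hra
      · rw [hiff2 e, hmemn e, (hracongr n e)]
        rw [pvRA_absorb_start (map_data := map_data) (rows := rows) (cols := cols)
          (V := fun x => x ∈ vis) (n := n) (e := e)]
        constructor
        · rintro (hn | ⟨hra, hne, h9e⟩)
          · exact Or.inl hn
          · exact Or.inr ⟨hadj, hnvis, Or.inr hra, fun hv => hne (Or.inl hv), h9e⟩
        · rintro (hn | ⟨_, _, (heq | hra), hne, h9e⟩)
          · exact Or.inl hn
          · exact absurd (by rw [← heq]; exact h9e) h9
          · by_cases heq2 : e = n
            · exact absurd (by rw [← heq2]; exact h9e) h9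
            · refine Or.inr ⟨hra, ?_, h9e⟩
              rintro (hv | h)
              · exact hne hv
              · exact heq2 h
  · have hng : ¬ (pvAdj map_data rows cols c n ∧ n ∉ vis) := by
      intro ⟨⟨_, hb1, hb2, hb3, hb4, hb5⟩, hnm⟩
      exact hg ⟨hb1, hb2, hb3, hb4, by simpa [PySem.Set.contains_iff] using hnm, hb5⟩
    have hstep : pvStepB map_data rows cols f c (vis, nines) n = (vis, nines) := by
      rw [pvStepB, if_neg hg]
    rw [hstep]
    refine ⟨hvnd, hnnd, fun e => ?_, fun e => ?_⟩
    · constructor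
      · exact fun h => Or.inl h
      · rintro (h | ⟨hadj, hnm, _⟩)
        · exact h
        · exact absurd ⟨hadj, hnm⟩ hng
    · constructor
      · exact fun h => Or.inl h
      · rintro (h | ⟨hadj, hnm, _⟩)
        · exact h
        · exact absurd ⟨hadj, hnm⟩ hng

-- B's fold over a list of candidate neighbours of c
set_option maxHeartbeats 2000000 in
theorem foldB_char (map_data : List (List Int)) (rows cols : Int) (f : Nat)
    (IH : ∀ (c : Int × Int) (vis nines : List (Int × Int)),
      vis.Nodup → nines.Nodup → (∀ x ∈ nines, x ∈ vis) → c ∈ vis →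
      pvUnv rows cols vis + 1 ≤ f →
      (pvDfsB map_data rows cols f c (vis, nines)).1.Nodup ∧
      (pvDfsB map_data rows cols f c (vis, nines)).2.Nodup ∧
      (∀ e, e ∈ (pvDfsB map_data rows cols f c (vis, nines)).1 ↔
        e ∈ vis ∨ pvRA map_data rows cols (fun x => x ∈ vis) c e) ∧
      (∀ e, e ∈ (pvDfsB map_data rows cols f c (vis, nines)).2 ↔
        e ∈ nines ∨ (pvRA map_data rows cols (fun x => x ∈ vis) c e ∧ e ∉ vis ∧
          pvAt map_data e.1 e.2 = 9)))
    (c : Int × Int) :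
    ∀ (ns : List (Int × Int)),
    (∀ n ∈ ns, n = (c.1 - 1, c.2) ∨ n = (c.1 + 1, c.2) ∨ n = (c.1, c.2 - 1) ∨ n = (c.1, c.2 + 1)) →
    ∀ (vis nines : List (Int × Int)), vis.Nodup → nines.Nodup → (∀ x ∈ nines, x ∈ vis) →
    pvUnv rows cols vis ≤ f →
    (List.foldl (pvStepB map_data rows cols f c) (vis, nines) ns).1.Nodup ∧
    (List.foldl (pvStepB map_data rows cols f c) (vis, nines) ns).2.Nodup ∧
    (∀ e, e ∈ (List.foldl (pvStepB map_data rows cols f c) (vis, nines) ns).1 ↔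
      e ∈ vis ∨ (∃ m ∈ ns, pvAdj map_data rows cols c m ∧ m ∉ vis ∧
        pvRA map_data rows cols (fun x => x ∈ vis) m e)) ∧
    (∀ e, e ∈ (List.foldl (pvStepB map_data rows cols f c) (vis, nines) ns).2 ↔
      e ∈ nines ∨ ((∃ m ∈ ns, pvAdj map_data rows cols c m ∧ m ∉ vis ∧
        pvRA map_data rows cols (fun x => x ∈ vis) m e) ∧ e ∉ vis ∧
        pvAt map_data e.1 e.2 = 9)) := by
  intro ns
  induction ns with
  | nil =>
    intro _ vis nines hvnd hnnd hnv _
    refine ⟨hvnd, hnnd, fun e => ?_, fun e => ?_⟩ <;> simp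
  | cons n ns ihns =>
    intro hoffs vis nines hvnd hnnd hnv hfu
    obtain ⟨hs1, hs2, hc1, hc2⟩ := stepB_char map_data rows cols f IH c n
      (hoffs n (List.mem_cons_self)) vis nines hvnd hnnd hnv hfu
    set st1 := pvStepB map_data rows cols f c (vis, nines) n with hst1
    have hsub1 : ∀ x ∈ vis, x ∈ st1.1 := fun x hx => (hc1 x).mpr (Or.inl hx)
    have hnv1 : ∀ x ∈ st1.2, x ∈ st1.1 := by
      intro x hx
      rcases (hc2 x).mp hx with h | ⟨hBa, hBb, hBc, _, _⟩
      · exact hsub1 x (hnv x h)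
      · exact (hc1 x).mpr (Or.inr ⟨hBa, hBb, hBc⟩)
    have hfu1 : pvUnv rows cols st1.1 ≤ f :=
      le_trans (pvUnv_le_of_subset hsub1) hfu
    have hfold : List.foldl (pvStepB map_data rows cols f c) (vis, nines) (n :: ns) =
        List.foldl (pvStepB map_data rows cols f c) st1 ns := by
      rw [List.foldl_cons]
    obtain ⟨hr1, hr2, hr3, hr4⟩ := ihns (fun m hm => hoffs m (List.mem_cons_of_mem _ hm))
      st1.1 st1.2 hs1 hs2 hnv1 hfu1
    rw [hfold]
    have hchar1 : ∀ x, x ∈ st1.1 ↔ x ∈ vis ∨ (pvAdj map_data rows cols c n ∧ n ∉ vis ∧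
        pvRA map_data rows cols (fun y => y ∈ vis) n x) := hc1
    have hconv : ∀ e, (∃ m ∈ ns, pvAdj map_data rows cols c m ∧ m ∉ st1.1 ∧
        pvRA map_data rows cols (fun x => x ∈ st1.1) m e) ↔
        (∃ m ∈ ns, pvAdj map_data rows cols c m ∧
          ¬ (m ∈ vis ∨ (pvAdj map_data rows cols c n ∧ n ∉ vis ∧
            pvRA map_data rows cols (fun y => y ∈ vis) n m)) ∧
          pvRA map_data rows cols (fun x => x ∈ vis ∨ (pvAdj map_data rows cols c n ∧ n ∉ vis ∧
            pvRA map_data rows cols (fun y => y ∈ vis) n x)) m e) := by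
      intro e
      constructor
      · rintro ⟨m, hm, ha, hb, hr⟩
        exact ⟨m, hm, ha, fun h => hb ((hchar1 m).mpr h), (pvRA_congr hchar1).mp hr⟩
      · rintro ⟨m, hm, ha, hb, hr⟩
        exact ⟨m, hm, ha, fun h => hb ((hchar1 m).mp h), (pvRA_congr hchar1).mpr hr⟩
    have hsh := fun e => first_shift (map_data := map_data) (rows := rows) (cols := cols)
      (c := c) (n := n) (vis := vis)
      (B := fun x => pvAdj map_data rows cols c n ∧ n ∉ vis ∧
        pvRA map_data rows cols (fun y => y ∈ vis) n x)
      (fun x => Iff.rfl) (ns := ns) e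
    have hcons : ∀ e, (∃ m ∈ n :: ns, pvAdj map_data rows cols c m ∧ m ∉ vis ∧
        pvRA map_data rows cols (fun x => x ∈ vis) m e) ↔
        ((pvAdj map_data rows cols c n ∧ n ∉ vis ∧
          pvRA map_data rows cols (fun x => x ∈ vis) n e) ∨
         (∃ m ∈ ns, pvAdj map_data rows cols c m ∧ m ∉ vis ∧
          pvRA map_data rows cols (fun x => x ∈ vis) m e)) := by
      intro e
      constructor
      · rintro ⟨m, hm, ha, hb, hr⟩
        rcases List.mem_cons.mp hm with rfl | hm'
        · exact Or.inl ⟨ha, hb, hr⟩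
        · exact Or.inr ⟨m, hm', ha, hb, hr⟩
      · rintro (⟨ha, hb, hr⟩ | ⟨m, hm, ha, hb, hr⟩)
        · exact ⟨n, List.mem_cons_self, ha, hb, hr⟩
        · exact ⟨m, List.mem_cons_of_mem _ hm, ha, hb, hr⟩
    refine ⟨hr1, hr2, fun e => ?_, fun e => ?_⟩
    · rw [hr3 e, hc1 e, hcons e, hconv e]
      have := hsh e
      constructor
      · rintro ((hv | hB) | hX)
        · exact Or.inl hv
        · exact Or.inr (Or.inl hB)
        · rcases this.mp (Or.inl hX) with h | h | h
          · exact Or.inr (Or.inr h)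
          · exact Or.inr (Or.inl h)
          · exact Or.inl h
      · rintro (hv | hB | hY)
        · exact Or.inl (Or.inl hv)
        · exact Or.inl (Or.inr hB)
        · rcases this.mpr (Or.inl hY) with h | h | h
          · exact Or.inr h
          · exact Or.inl (Or.inr h)
          · exact Or.inl (Or.inl h)
    · rw [hr4 e, hc2 e, hcons e, hconv e]
      have h1 := hsh e
      have h2 : e ∈ st1.1 ↔ e ∈ vis ∨ (pvAdj map_data rows cols c n ∧ n ∉ vis ∧
          pvRA map_data rows cols (fun y => y ∈ vis) n e) := hchar1 e
      constructor
      · rintro ((hn | ⟨ha, hb, hc3, hd, h9⟩) | ⟨hX, hs, h9⟩)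
        · exact Or.inl hn
        · exact Or.inr ⟨Or.inl ⟨ha, hb, hc3⟩, hd, h9⟩
        · have hnotvis : e ∉ vis := fun hv => hs (h2.mpr (Or.inl hv))
          have hnotB : ¬ (pvAdj map_data rows cols c n ∧ n ∉ vis ∧
              pvRA map_data rows cols (fun y => y ∈ vis) n e) :=
            fun hB => hs (h2.mpr (Or.inr hB))
          rcases h1.mp (Or.inl hX) with h | h | h
          · exact Or.inr ⟨Or.inr h, hnotvis, h9⟩
          · exact absurd h hnotB
          · exact absurd h hnotvis
      · rintro (hn | ⟨hBY, hd, h9⟩)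
        · exact Or.inl (Or.inl hn)
        · rcases hBY with hB | hY
          · exact Or.inl (Or.inr ⟨hB.1, hB.2.1, hB.2.2, hd, h9⟩)
          · rcases h1.mpr (Or.inl hY) with h | h | h
            · by_cases hB : pvAdj map_data rows cols c n ∧ n ∉ vis ∧
                  pvRA map_data rows cols (fun y => y ∈ vis) n e
              · exact Or.inl (Or.inr ⟨hB.1, hB.2.1, hB.2.2, hd, h9⟩)
              · refine Or.inr ⟨h, fun hst => ?_, h9⟩
                rcases h2.mp hst with hv | hBe
                · exact hd hv
                · exact hB hBe
            · exact Or.inl (Or.inr ⟨h.1, h.2.1, h.2.2, hd, h9⟩)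
            · exact absurd h hd

-- B's dfs computes: old state plus everything reachable from c (and its reachable 9s)
theorem dfsB_char (map_data : List (List Int)) (rows cols : Int) :
    ∀ (fuel : Nat) (c : Int × Int) (vis nines : List (Int × Int)),
    vis.Nodup → nines.Nodup → (∀ x ∈ nines, x ∈ vis) → c ∈ vis →
    pvUnv rows cols vis + 1 ≤ fuel →
    (pvDfsB map_data rows cols fuel c (vis, nines)).1.Nodup ∧
    (pvDfsB map_data rows cols fuel c (vis, nines)).2.Nodup ∧
    (∀ e, e ∈ (pvDfsB map_data rows cols fuel c (vis, nines)).1 ↔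
      e ∈ vis ∨ pvRA map_data rows cols (fun x => x ∈ vis) c e) ∧
    (∀ e, e ∈ (pvDfsB map_data rows cols fuel c (vis, nines)).2 ↔
      e ∈ nines ∨ (pvRA map_data rows cols (fun x => x ∈ vis) c e ∧ e ∉ vis ∧
        pvAt map_data e.1 e.2 = 9)) := by
  intro fuel
  induction fuel with
  | zero =>
    intro c vis nines _ _ _ _ hfu
    omega
  | succ f ihf =>
    intro c vis nines hvnd hnnd hnv hc hfu
    rw [pvDfsB_succ]
    obtain ⟨hr1, hr2, hr3, hr4⟩ := foldB_char map_data rows cols f ihf c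
      [(c.1 - 1, c.2), (c.1 + 1, c.2), (c.1, c.2 - 1), (c.1, c.2 + 1)]
      (by intro m hm; simpa using hm)
      vis nines hvnd hnnd hnv (by omega)
    have hiff : ∀ e, ((∃ m ∈ [(c.1 - 1, c.2), (c.1 + 1, c.2), (c.1, c.2 - 1), (c.1, c.2 + 1)],
        pvAdj map_data rows cols c m ∧ m ∉ vis ∧
        pvRA map_data rows cols (fun x => x ∈ vis) m e) ∨ e ∈ vis) ↔
        (pvRA map_data rows cols (fun x => x ∈ vis) c e ∨ e ∈ vis) := by
      intro e
      constructor
      · rintro (⟨m, _, ha, hb, hr⟩ | h)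
        · exact Or.inl (pvRA_trans (pvRA.step (pvRA.refl c) ha hb) hr)
        · exact Or.inr h
      · rintro (hr | h)
        · rcases pvRA_first hr with rfl | ⟨m, ha, hb, hr'⟩
          · exact Or.inr hc
          · refine Or.inl ⟨m, ?_, ha, hb, hr'⟩
            rcases ha.1 with h' | h' | h' | h' <;> simp [h']
        · exact Or.inr h
    refine ⟨hr1, hr2, fun e => ?_, fun e => ?_⟩
    · rw [hr3 e]
      constructor
      · rintro (h | hX)
        · exact Or.inl h
        · rcases (hiff e).mp (Or.inl hX) with h | h
          · exact Or.inr h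
          · exact Or.inl h
      · rintro (h | hR)
        · exact Or.inl h
        · rcases (hiff e).mpr (Or.inl hR) with h | h
          · exact Or.inr h
          · exact Or.inl h
    · rw [hr4 e]
      constructor
      · rintro (h | ⟨hX, hA, h9⟩)
        · exact Or.inl h
        · rcases (hiff e).mp (Or.inl hX) with h | h
          · exact Or.inr ⟨h, hA, h9⟩
          · exact absurd h hA
      · rintro (h | ⟨hR, hA, h9⟩)
        · exact Or.inl h
        · rcases (hiff e).mpr (Or.inl hR) with h | h
          · exact Or.inr ⟨h, hA, h9⟩
          · exact absurd h hA

theorem bfs_eq_alt (map_data : List (List Int)) (start_x start_y : Int) :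
    bfs map_data start_x start_y = bfs_alt map_data start_x start_y := by
  simp only [bfs, bfs_alt]
  have hof : PySem.Set.ofList [(start_x, start_y)] = [(start_x, start_y)] :=
    PySem.Set.ofList_eq_self_of_nodup _ (List.nodup_singleton _)
  rw [hof]
  set rows : Int := (map_data.length : Int) with hrows
  set cols : Int := ((map_data.head?.getD []).length : Int) with hcols
  set fuel : Nat := map_data.length * (map_data.head?.getD []).length + 1 with hfuel
  have hunv : pvUnv rows cols [(start_x, start_y)] + 1 ≤ fuel := by
    have h1 : pvUnv rows cols [(start_x, start_y)] ≤
        map_data.length * (map_data.head?.getD []).length := by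
      simpa [hrows, hcols] using pvUnv_top rows cols [(start_x, start_y)]
    omega
  obtain ⟨hndA, hiffA⟩ := loopA_char map_data rows cols fuel [(start_x, start_y)]
    [(start_x, start_y)] [] (List.nodup_singleton _) List.nodup_nil
    (by intro x hx; cases hx) (fun q hq => hq)
    (by simp; omega)
  obtain ⟨_, hndB, _, hiffB⟩ := dfsB_char map_data rows cols fuel (start_x, start_y)
    [(start_x, start_y)] [] (List.nodup_singleton _) List.nodup_nil
    (by intro x hx; cases hx) (List.mem_singleton.mpr rfl) hunv
  have hmemeq : ∀ e, e ∈ pvLoopA map_data rows cols fuel [(start_x, start_y)]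
      [(start_x, start_y)] [] ↔
      e ∈ (pvDfsB map_data rows cols fuel (start_x, start_y)
        ([(start_x, start_y)], [])).2 := by
    intro e
    rw [hiffA e, hiffB e]
    constructor
    · rintro (h | ⟨⟨s, hs, hr⟩, h2, h3⟩)
      · cases h
      · rw [List.mem_singleton] at hs
        exact Or.inr ⟨hs ▸ hr, h2, h3⟩
    · rintro (h | ⟨hr, h2, h3⟩)
      · cases h
      · exact Or.inr ⟨⟨(start_x, start_y), List.mem_singleton.mpr rfl, hr⟩, h2, h3⟩
  have hperm := (List.perm_ext_iff_of_nodup hndA hndB).mpr hmemeq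
  simp only [PySem.Set.len,
    show (PySem.Set.empty : PySem.Set (Int × Int)) = [] from rfl, hperm.length_eq]

-- ===== VERDICT (by name: the statement is the Claim_ definition above) =====
theorem bfs_spec : Claim_equal_bfs := by
  intro map_data start_x start_y _ _
  unfold Spec_bfs
  exact bfs_eq_alt map_data start_x start_y
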